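-- pv_equiv track=rewrite | github.com/Zhaoyilunnn/llm4ad | tests/test_task_bp_2d.py | determine_next_assignment
-- ===== SOURCE A (Python) =====
-- from typing import List, Tuple
--
-- def determine_next_assignment(remaining_items: List[int], remaining_capacities: List[int]) -> Tuple[int, int | None]:
--     """
--     Determine the next item and bin to pack based on a greedy heuristic.
--     Args:
--     remaining_items: A list of remaining item weights.
--     remaining_capacities: A list of remaining capacities of feasible bins.
--     Returns:
--     A tuple containing:
--     - The selected item to pack.
--     - The selected bin to pack the item into (or None if no feasible bin is found).
--     """
--     sorted_items = sorted(remaining_items)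
--     sorted_bins = sorted(remaining_capacities, reverse=True)
--     for item in sorted_items:
--         for bin_idx, capacity in enumerate(sorted_bins):
--             if item <= capacity:
--                 return item, bin_idx
--     return (sorted_items[0], None) if sorted_items else (None, None)
-- ===== SOURCE B (Python) =====
-- def determine_next_assignment(remaining_items, remaining_capacities):
--     # O(n+m): the greedy always picks the smallest item; it fits iff it fits
--     # the largest bin, and then the chosen bin index is always 0.
--     if not remaining_items:
--         return (None, None)
--     item = min(remaining_items)
--     if remaining_capacities and item <= max(remaining_capacities):
--         return (item, 0)
--     return (item, None)
-- ===== Notes on version B (the rewrite author's own statement) =====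
-- stated objective: faster
-- what changed: Replaces the two sorts and nested scan by a single min/max pass: the greedy always selects the smallest item and bin index 0 of the descending-sorted bins, i.e. (min,0) if min item fits max capacity else (min,None).
import Mathlib
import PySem

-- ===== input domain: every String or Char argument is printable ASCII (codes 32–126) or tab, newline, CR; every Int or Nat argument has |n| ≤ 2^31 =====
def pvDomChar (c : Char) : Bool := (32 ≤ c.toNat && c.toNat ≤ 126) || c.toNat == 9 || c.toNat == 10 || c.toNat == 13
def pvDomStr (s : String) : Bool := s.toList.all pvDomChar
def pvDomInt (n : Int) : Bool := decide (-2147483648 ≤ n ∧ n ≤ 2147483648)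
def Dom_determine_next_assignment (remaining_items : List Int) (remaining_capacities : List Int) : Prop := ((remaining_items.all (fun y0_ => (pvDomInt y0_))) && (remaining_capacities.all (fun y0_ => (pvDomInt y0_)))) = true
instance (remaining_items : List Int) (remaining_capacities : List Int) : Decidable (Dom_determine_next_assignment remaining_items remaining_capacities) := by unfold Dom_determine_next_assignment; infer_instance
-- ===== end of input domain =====

-- B replaces A's two sorts and nested scan by one min/max pass (asymptotically faster).

-- ===== PORT A =====
-- inner 'for bin_idx, capacity in enumerate(sorted_bins): if item <= capacity: return bin_idx'
def pvInnerA (item : Int) : List Int → Int → Option Int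
  | [], _ => none
  | c :: rest, idx => if item ≤ c then some idx else pvInnerA item rest (idx + 1)

-- outer 'for item in sorted_items: …'
def pvOuterA (sorted_bins : List Int) : List Int → Option (Int × Int)
  | [] => none
  | i :: rest =>
    match pvInnerA i sorted_bins 0 with
    | some idx => some (i, idx)
    | none => pvOuterA sorted_bins rest

def determine_next_assignment (remaining_items : List Int) (remaining_capacities : List Int) : Option Int × Option Int :=
  let sorted_items := PySem.List.sorted remaining_items (fun x => x) false
  let sorted_bins := PySem.List.sorted remaining_capacities (fun x => x) true
  match pvOuterA sorted_bins sorted_items with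
  | some (it, idx) => (some it, some idx)
  | none =>
    match sorted_items with
    | [] => (none, none)
    | x :: _ => (some x, none)

-- ===== PORT B =====
def determine_next_assignment_alt (remaining_items : List Int) (remaining_capacities : List Int) : Option Int × Option Int :=
  match PySem.List.min? remaining_items (fun x => x) with
  | none => (none, none)
  | some item =>
    match PySem.List.max? remaining_capacities (fun x => x) with
    | some m => if item ≤ m then (some item, some 0) else (some item, none)
    | none => (some item, none)

-- ===== PRECONDITION & SPEC =====
def Spec_determine_next_assignment (remaining_items : List Int) (remaining_capacities : List Int) (out : Option Int × Option Int) : Prop := out = determine_next_assignment_alt remaining_items remaining_capacities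
instance (remaining_items : List Int) (remaining_capacities : List Int) (out : Option Int × Option Int) : Decidable (Spec_determine_next_assignment remaining_items remaining_capacities out) := by unfold Spec_determine_next_assignment; infer_instance

-- ===== CLAIM (what is proved, stated in full; the proofs are below) =====
def Claim_equal_determine_next_assignment : Prop := ∀ (remaining_items : List Int) (remaining_capacities : List Int), Dom_determine_next_assignment remaining_items remaining_capacities → Spec_determine_next_assignment remaining_items remaining_capacities (determine_next_assignment remaining_items remaining_capacities)

-- ===== LEMMAS AND PROOFS =====

-- the inner scan finds nothing when the item fits no bin
theorem pvInnerA_none (item : Int) (bins : List Int) (h : ∀ c ∈ bins, ¬ item ≤ c) :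
    ∀ k, pvInnerA item bins k = none := by
  induction bins with
  | nil => intro k; rfl
  | cons c rest ih =>
    intro k
    simp only [pvInnerA]
    rw [if_neg (h c (by simp))]
    exact ih (fun x hx => h x (by simp [hx])) (k + 1)

theorem pvOuterA_none (bins : List Int) (s : List Int)
    (h : ∀ i ∈ s, ∀ c ∈ bins, ¬ i ≤ c) : pvOuterA bins s = none := by
  induction s with
  | nil => rfl
  | cons i rest ih =>
    simp only [pvOuterA]
    rw [pvInnerA_none i bins (h i (by simp)) 0]
    exact ih (fun x hx => h x (by simp [hx]))

-- the head of sorted(xs) is min(xs)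
theorem head_sorted_eq_min (xs : List Int) (m : Int) (t : List Int)
    (h : PySem.List.sorted xs (fun x => x) false = m :: t) :
    PySem.List.min? xs (fun x => x) = some m := by
  have hmem : m ∈ xs := (PySem.List.mem_sorted xs (fun x => x) false m).mp (by rw [h]; simp)
  cases hmin : PySem.List.min? xs (fun x => x) with
  | none =>
    have : xs = [] := (PySem.List.min?_eq_none_iff xs (fun x => x)).mp hmin
    subst this; simp at hmem
  | some m' =>
    have h1 : m' ≤ m := PySem.List.min?_isMin hmin m hmem
    have h2 : m ≤ m' := PySem.List.key_head_sorted_le xs (fun x => x) h m' (PySem.List.min?_mem hmin)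
    exact congrArg some (le_antisymm h1 h2)

-- the head of sorted(xs, reverse=True) is max(xs)
theorem head_sorted_rev_eq_max (xs : List Int) (m : Int) (t : List Int)
    (h : PySem.List.sorted xs (fun x => x) true = m :: t) :
    PySem.List.max? xs (fun x => x) = some m := by
  have hmem : m ∈ xs := (PySem.List.mem_sorted xs (fun x => x) true m).mp (by rw [h]; simp)
  cases hmax : PySem.List.max? xs (fun x => x) with
  | none =>
    have : xs = [] := (PySem.List.max?_eq_none_iff xs (fun x => x)).mp hmax
    subst this; simp at hmem
  | some m' =>
    have h1 : m ≤ m' := PySem.List.max?_isMax hmax m hmem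
    have h2 : m' ≤ m := PySem.List.key_head_sorted_rev_ge xs (fun x => x) h m' (PySem.List.max?_mem hmax)
    exact congrArg some (le_antisymm h2 h1)

-- ===== VERDICT (by name: the statement is the Claim_ definition above) =====
theorem determine_next_assignment_spec : Claim_equal_determine_next_assignment := by
  intro items caps _
  unfold Spec_determine_next_assignment determine_next_assignment determine_next_assignment_alt
  cases hs : PySem.List.sorted items (fun x => x) false with
  | nil =>
    have : items = [] := (PySem.List.sorted_eq_nil_iff items (fun x => x) false).mp hs
    subst this
    simp [pvOuterA, PySem.List.min?]
  | cons m t =>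
    rw [head_sorted_eq_min items m t hs]
    cases hb : PySem.List.sorted caps (fun x => x) true with
    | nil =>
      have hc : caps = [] := (PySem.List.sorted_eq_nil_iff caps (fun x => x) true).mp hb
      subst hc
      have : pvOuterA [] (m :: t) = none := pvOuterA_none [] (m :: t) (by simp)
      simp [this, PySem.List.max?]
    | cons c bt =>
      rw [head_sorted_rev_eq_max caps c bt hb]
      by_cases hfit : m ≤ c
      · simp only [pvOuterA, pvInnerA, if_pos hfit]
      · have houter : pvOuterA (c :: bt) (m :: t) = none := by
          apply pvOuterA_none
          intro i hi cap hcap hle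
          have h1 : m ≤ i := PySem.List.key_head_sorted_le items (fun x => x) hs i ((PySem.List.mem_sorted items (fun x => x) false i).mp (by rw [hs]; exact hi))
          have h2 : cap ≤ c := PySem.List.key_head_sorted_rev_ge caps (fun x => x) hb cap ((PySem.List.mem_sorted caps (fun x => x) true cap).mp (by rw [hb]; exact hcap))
          exact hfit (le_trans h1 (le_trans hle h2))
        simp [houter, hfit]
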